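-- pv_equiv track=rewrite | github.com/ankurbhambri/DS-Algo | binary_search/difference_median.py | find_median_difference
-- ===== SOURCE A (Python) =====
-- def count_pairs_with_diff_leq(arr, value):
--     count = 0
--     n = len(arr)
--     j = 0
--     for i in range(n):
--         while j < n and arr[j] - arr[i] <= value:
--             j += 1
--         count += j - i - 1
--     return count
--
-- def find_median_difference(arr):
--
--     n = len(arr)
--     arr.sort()
--
--     low = 0
--     high = arr[-1] - arr[0]
--
--     while low <= high:
--         mid = (low + high) // 2
--         c = count_pairs_with_diff_leq(arr, mid)
--         if c < n * (n - 1) // 2 // 2: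
--             low = mid + 1
--         else:
--             high = mid - 1
--
--     return low
-- ===== SOURCE B (Python) =====
-- def find_median_difference(arr):
--     # Simpler: enumerate all pairwise differences, sort, pick the (m//2)-th smallest.
--     # Note: like A, this sorts arr in place. Equivalence is about the return value.
--     arr.sort()
--     n = len(arr)
--     diffs = sorted(arr[j] - arr[i] for i in range(n) for j in range(i + 1, n))
--     target = len(diffs) // 2
--     return diffs[target - 1] if target > 0 else 0
-- ===== Notes on version B (the rewrite author's own statement) =====
-- stated objective: simpler
-- what changed: Replaces A's binary search over the answer with a two-pointer pair counter by directly enumerating all pairwise differences, sorting them and indexing the (m//2)-th smallest (with A's same lower-median off-by-one and 0 for fewer than two pairs).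
import Mathlib
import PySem

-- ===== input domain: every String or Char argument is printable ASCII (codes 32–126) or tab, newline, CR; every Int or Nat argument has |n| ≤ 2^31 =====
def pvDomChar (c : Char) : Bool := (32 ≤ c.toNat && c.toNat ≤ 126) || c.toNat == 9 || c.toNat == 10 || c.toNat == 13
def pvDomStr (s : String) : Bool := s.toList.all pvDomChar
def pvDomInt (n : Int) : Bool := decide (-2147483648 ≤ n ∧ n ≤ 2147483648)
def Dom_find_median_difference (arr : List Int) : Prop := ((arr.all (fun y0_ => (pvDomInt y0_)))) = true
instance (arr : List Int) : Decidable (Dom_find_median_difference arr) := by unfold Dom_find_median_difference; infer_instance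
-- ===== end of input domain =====

-- B replaces A's binary search + two-pointer counting by "enumerate all pairwise
-- differences, sort, index the (m//2)-th smallest" (simpler, not faster).
-- Both A and B sort arr in place in Python; the equivalence proved here is about
-- the return value only.

-- ===== PORT A =====

-- arr[i]; exact because every use below has the index in range (loop guards)
def pvAt (a : List Int) (i : Int) : Int := PySem.List.pyGetD a i 0

-- the inner `while j < n and arr[j] - arr[i] <= value: j += 1`
def pvWhileJ (a : List Int) (v i j : Int) : Int :=
  if h : j < (a.length : Int) ∧ pvAt a j - pvAt a i ≤ v then pvWhileJ a v i (j + 1)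
  else j
termination_by ((a.length : Int) - j).toNat
decreasing_by omega

def count_pairs_with_diff_leq (arr : List Int) (value : Int) : Int :=
  let n : Int := arr.length
  ((PySem.List.pyRange 0 n 1).foldl
    (fun st i =>
      let j := pvWhileJ arr value i st.2
      (st.1 + (j - i - 1), j))
    ((0 : Int), (0 : Int))).1

-- the `while low <= high` binary-search loop of A
def pvLoop (a : List Int) (n low high : Int) : Int :=
  if h : low ≤ high then
    let mid := PySem.Int.floordiv (low + high) 2
    if count_pairs_with_diff_leq a mid <
        PySem.Int.floordiv (PySem.Int.floordiv (n * (n - 1)) 2) 2 then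
      pvLoop a n (mid + 1) high
    else
      pvLoop a n low (mid - 1)
  else low
termination_by (high - low + 1).toNat
decreasing_by
  · have := PySem.Int.floordiv_two_mid_bounds h; omega
  · have := PySem.Int.floordiv_two_mid_bounds h; omega

def find_median_difference (arr : List Int) : Int :=
  let a := PySem.List.sorted arr (fun x => x) false
  let n : Int := a.length
  let low : Int := 0
  -- arr[-1] - arr[0]: in range under Pre_ (arr ≠ [])
  let high : Int := PySem.List.pyGetD a (-1) 0 - PySem.List.pyGetD a 0 0
  pvLoop a n low high

-- ===== PORT B =====

def find_median_difference_alt (arr : List Int) : Int :=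
  let a := PySem.List.sorted arr (fun x => x) false
  let n : Int := a.length
  let diffs := PySem.List.sorted
    ((PySem.List.pyRange 0 n 1).flatMap (fun i =>
      (PySem.List.pyRange (i + 1) n 1).map (fun j => pvAt a j - pvAt a i)))
    (fun x => x) false
  let target : Int := PySem.Int.floordiv (diffs.length : Int) 2
  if target > 0 then PySem.List.pyGetD diffs (target - 1) 0 else 0

-- ===== PRECONDITION & SPEC =====

-- Pre_ excludes only the empty list, on which A raises IndexError (arr[-1]).
def Pre_find_median_difference (arr : List Int) : Prop := arr ≠ []
instance (arr : List Int) : Decidable (Pre_find_median_difference arr) := by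
  unfold Pre_find_median_difference; infer_instance

def pvWitness_find_median_difference : List Int := [3, 0, 7, 2]

def Spec_find_median_difference (arr : List Int) (out : Int) : Prop :=
  out = find_median_difference_alt arr
instance (arr : List Int) (out : Int) : Decidable (Spec_find_median_difference arr out) := by
  unfold Spec_find_median_difference; infer_instance

-- ===== CLAIM (what is proved, stated in full; the proofs are below) =====
def Claim_equal_find_median_difference : Prop :=
  ∀ (arr : List Int), Dom_find_median_difference arr →
    Pre_find_median_difference arr →
    Spec_find_median_difference arr (find_median_difference arr)

-- ===== LEMMAS AND PROOFS =====

-- the unsorted comprehension of all pairwise differences of a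
def pvDiffs (a : List Int) : List Int :=
  (PySem.List.pyRange 0 (a.length : Int) 1).flatMap (fun i =>
    (PySem.List.pyRange (i + 1) (a.length : Int) 1).map (fun j => pvAt a j - pvAt a i))

-- monotone access (Nat indices) in a ≤-pairwise list
lemma pvGetElem_mono {l : List Int} (hl : l.Pairwise (· ≤ ·)) {p q : Nat}
    (hpq : p ≤ q) (hq : q < l.length) : l[p]'(by omega) ≤ l[q] := by
  rcases Nat.eq_or_lt_of_le hpq with h | h
  · subst h; exact le_refl _
  · exact List.pairwise_iff_getElem.mp hl p q (by omega) hq h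

-- monotonicity of access in a sorted list
lemma pvAt_mono {a : List Int} (hs : a.Pairwise (· ≤ ·)) {s t : Int}
    (h0 : 0 ≤ s) (hst : s ≤ t) (ht : t < (a.length : Int)) : pvAt a s ≤ pvAt a t := by
  have h0t : 0 ≤ t := le_trans h0 hst
  rw [pvAt, pvAt, PySem.List.pyGetD_eq_getElem a 0 h0 (by omega),
      PySem.List.pyGetD_eq_getElem a 0 h0t ht]
  exact pvGetElem_mono hs (by omega) (by omega)

-- characterisation of the inner while loop
lemma pvWhileJ_spec (a : List Int) (v i j : Int) (hj0 : 0 ≤ j) (hjn : j ≤ (a.length : Int)) :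
    j ≤ pvWhileJ a v i j ∧ pvWhileJ a v i j ≤ (a.length : Int) ∧
    (∀ t, j ≤ t → t < pvWhileJ a v i j → pvAt a t - pvAt a i ≤ v) ∧
    (pvWhileJ a v i j < (a.length : Int) → ¬ (pvAt a (pvWhileJ a v i j) - pvAt a i ≤ v)) := by
  rw [pvWhileJ]
  split
  case isTrue h =>
    have ih := pvWhileJ_spec a v i (j + 1) (by omega) (by omega)
    refine ⟨by omega, ih.2.1, ?_, ih.2.2.2⟩
    intro t ht1 ht2
    rcases eq_or_lt_of_le ht1 with he | hlt
    · rw [← he]; exact h.2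
    · exact ih.2.2.1 t (by omega) ht2
  case isFalse h =>
    refine ⟨le_refl _, hjn, fun t ht1 ht2 => absurd (lt_of_le_of_lt ht1 ht2) (lt_irrefl j), ?_⟩
    intro hlt hle
    exact h ⟨hlt, hle⟩
termination_by ((a.length : Int) - j).toNat
decreasing_by omega

-- the fold of A's outer loop computes the countP of the remaining comprehension
lemma pvFold_inv {a : List Int} (hs : a.Pairwise (· ≤ ·)) (v : Int) (hv : 0 ≤ v)
    (i c j : Int) (hi : 0 ≤ i) (hj0 : 0 ≤ j) (hjn : j ≤ (a.length : Int))
    (hpre : (i < (a.length : Int)) → ∀ t, 0 ≤ t → t < j → pvAt a t - pvAt a i ≤ v) :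
    ((PySem.List.pyRange i (a.length : Int) 1).foldl
        (fun st i' =>
          let j' := pvWhileJ a v i' st.2
          (st.1 + (j' - i' - 1), j'))
        (c, j)).1
      = c + (((PySem.List.pyRange i (a.length : Int) 1).flatMap (fun i' =>
          (PySem.List.pyRange (i' + 1) (a.length : Int) 1).map
            (fun t => pvAt a t - pvAt a i'))).countP (fun d => decide (d ≤ v)) : Int) := by
  by_cases hin : i < (a.length : Int)
  · rw [PySem.List.pyRange_one_cons hin]
    simp only [List.foldl_cons, List.flatMap_cons, List.countP_append]
    obtain ⟨hle1, hle2, hall, hstop⟩ := pvWhileJ_spec a v i j hj0 hjn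
    set j' := pvWhileJ a v i j with hj'def
    have hij' : i < j' := by
      by_contra hci
      push Not at hci
      have hlt : j' < (a.length : Int) := lt_of_le_of_lt hci hin
      have h1 := hstop hlt
      have h2 : pvAt a j' ≤ pvAt a i := pvAt_mono hs (by omega) hci hin
      omega
    have hb : ∀ t, 0 ≤ t → t < j' → pvAt a t - pvAt a i ≤ v := by
      intro t ht0 htj
      rcases lt_or_ge t j with h1 | h1
      · exact hpre hin t ht0 h1
      · exact hall t h1 htj
    have hc : ∀ t, j' ≤ t → t < (a.length : Int) → ¬ (pvAt a t - pvAt a i ≤ v) := by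
      intro t h1 h2 hle3
      have hj'n : j' < (a.length : Int) := lt_of_le_of_lt h1 h2
      have h3 := hstop hj'n
      have h4 : pvAt a j' ≤ pvAt a t := pvAt_mono hs (by omega) h1 h2
      omega
    have hcnt : ((PySem.List.pyRange (i + 1) (a.length : Int) 1).map
        (fun t => pvAt a t - pvAt a i)).countP (fun d => decide (d ≤ v))
        = (j' - i - 1).toNat := by
      rw [PySem.List.pyRange_one_append (i + 1) j' (a.length : Int) (by omega) hle2,
          List.map_append, List.countP_append]
      have h1 : ((PySem.List.pyRange (i + 1) j' 1).map
          (fun t => pvAt a t - pvAt a i)).countP (fun d => decide (d ≤ v))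
          = ((PySem.List.pyRange (i + 1) j' 1).map (fun t => pvAt a t - pvAt a i)).length := by
        rw [List.countP_eq_length]
        intro d hd
        obtain ⟨t, htmem, rfl⟩ := List.mem_map.mp hd
        obtain ⟨ht1, ht2⟩ := PySem.List.mem_pyRange_one.mp htmem
        simpa using hb t (by omega) ht2
      have h2 : ((PySem.List.pyRange j' (a.length : Int) 1).map
          (fun t => pvAt a t - pvAt a i)).countP (fun d => decide (d ≤ v)) = 0 := by
        rw [List.countP_eq_zero]
        intro d hd
        obtain ⟨t, htmem, rfl⟩ := List.mem_map.mp hd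
        obtain ⟨ht1, ht2⟩ := PySem.List.mem_pyRange_one.mp htmem
        simpa using hc t ht1 ht2
      rw [h1, h2, List.length_map, PySem.List.length_pyRange_one]
      omega
    have ihpre : (i + 1 < (a.length : Int)) →
        ∀ t, 0 ≤ t → t < j' → pvAt a t - pvAt a (i + 1) ≤ v := by
      intro h t ht0 htj
      have h1 := hb t ht0 htj
      have h2 : pvAt a i ≤ pvAt a (i + 1) := pvAt_mono hs hi (by omega) h
      omega
    have ih := pvFold_inv hs v hv (i + 1) (c + (j' - i - 1)) j' (by omega) (by omega) hle2 ihpre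
    rw [ih, hcnt]
    have : ((j' - i - 1).toNat : Int) = j' - i - 1 := by omega
    omega
  · have hempty : ((a.length : Int) - i).toNat = 0 := by omega
    rw [PySem.List.pyRange_one, hempty]
    simp
termination_by ((a.length : Int) - i).toNat
decreasing_by omega

lemma count_correct {a : List Int} (hs : a.Pairwise (· ≤ ·)) (v : Int) (hv : 0 ≤ v) :
    count_pairs_with_diff_leq a v
      = ((pvDiffs a).countP (fun d => decide (d ≤ v)) : Int) := by
  have h := pvFold_inv hs v hv 0 0 0 (le_refl 0) (le_refl 0) (by omega)
    (fun _ t ht0 ht1 => absurd ht1 (by omega))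
  simpa [count_pairs_with_diff_leq, pvDiffs] using h

-- selection in a sorted list: at least k elements are ≤ v iff the k-th smallest is ≤ v
lemma pvSel (l : List Int) (hl : l.Pairwise (· ≤ ·)) (k : Nat) (hk1 : 1 ≤ k)
    (hk2 : k ≤ l.length) (v : Int) :
    (k ≤ l.countP (fun d => decide (d ≤ v))) ↔ l[k - 1]'(by omega) ≤ v := by
  constructor
  · intro hcnt
    by_contra hv2
    push Not at hv2
    have hsplit : List.countP (fun d => decide (d ≤ v)) l
        = List.countP (fun d => decide (d ≤ v)) (l.take (k - 1))
          + List.countP (fun d => decide (d ≤ v)) (l.drop (k - 1)) := by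
      conv_lhs => rw [← List.take_append_drop (k - 1) l]
      rw [List.countP_append]
    have hdrop : List.countP (fun d => decide (d ≤ v)) (l.drop (k - 1)) = 0 := by
      rw [List.countP_eq_zero]
      intro x hx
      obtain ⟨idx, hidx, rfl⟩ := List.mem_iff_getElem.mp hx
      rw [List.getElem_drop]
      have h1 : l[k - 1]'(by omega) ≤ l[k - 1 + idx]'(by
          have := hidx; rw [List.length_drop] at this; omega) :=
        pvGetElem_mono hl (by omega) (by
          have := hidx; rw [List.length_drop] at this; omega)
      simp only [decide_eq_true_eq, not_le]
      omega
    have htake : List.countP (fun d => decide (d ≤ v)) (l.take (k - 1)) ≤ k - 1 := by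
      calc List.countP (fun d => decide (d ≤ v)) (l.take (k - 1))
          ≤ (l.take (k - 1)).length := List.countP_le_length
        _ ≤ k - 1 := by rw [List.length_take]; omega
    omega
  · intro hv2
    have h1 : List.countP (fun d => decide (d ≤ v)) (l.take k) = (l.take k).length := by
      rw [List.countP_eq_length]
      intro x hx
      obtain ⟨idx, hidx, rfl⟩ := List.mem_iff_getElem.mp hx
      rw [List.getElem_take]
      have hidx' : idx < l.length := by
        have := hidx; rw [List.length_take] at this; omega
      have hidxk : idx ≤ k - 1 := by
        have := hidx; rw [List.length_take] at this; omega
      have h2 : l[idx] ≤ l[k - 1]'(by omega) := pvGetElem_mono hl hidxk (by omega)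
      simp only [decide_eq_true_eq]
      omega
    have h2 : (l.take k).length = k := by rw [List.length_take]; omega
    have h3 := List.Sublist.countP_le (p := fun d => decide (d ≤ v)) (List.take_sublist k l)
    omega

-- A's binary search returns ans whenever the test characterises ans
lemma pvLoop_eq (a : List Int) (n tgt ans : Int)
    (htgt : PySem.Int.floordiv (PySem.Int.floordiv (n * (n - 1)) 2) 2 = tgt)
    (hkey : ∀ v, 0 ≤ v → (count_pairs_with_diff_leq a v < tgt ↔ v < ans))
    (low high : Int) (h0 : 0 ≤ low) (h1 : low ≤ ans) (h2 : ans ≤ high + 1) :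
    pvLoop a n low high = ans := by
  rw [pvLoop]
  split
  case isTrue h =>
    have hmid := PySem.Int.floordiv_two_mid_bounds h
    show (if count_pairs_with_diff_leq a (PySem.Int.floordiv (low + high) 2) <
        PySem.Int.floordiv (PySem.Int.floordiv (n * (n - 1)) 2) 2 then
          pvLoop a n (PySem.Int.floordiv (low + high) 2 + 1) high
        else pvLoop a n low (PySem.Int.floordiv (low + high) 2 - 1)) = ans
    rw [htgt]
    by_cases hc : count_pairs_with_diff_leq a (PySem.Int.floordiv (low + high) 2) < tgt
    · rw [if_pos hc]
      have hlt := (hkey (PySem.Int.floordiv (low + high) 2) (by omega)).mp hc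
      exact pvLoop_eq a n tgt ans htgt hkey (PySem.Int.floordiv (low + high) 2 + 1) high
        (by omega) (by omega) h2
    · rw [if_neg hc]
      have hge : ¬ (PySem.Int.floordiv (low + high) 2 < ans) :=
        fun hlt => hc ((hkey (PySem.Int.floordiv (low + high) 2) (by omega)).mpr hlt)
      exact pvLoop_eq a n tgt ans htgt hkey low (PySem.Int.floordiv (low + high) 2 - 1)
        h0 h1 (by omega)
  case isFalse h =>
    omega
termination_by (high - low + 1).toNat
decreasing_by
  · omega
  · omega

lemma mem_pvDiffs {a : List Int} {d : Int} (hd : d ∈ pvDiffs a) :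
    ∃ i j : Int, 0 ≤ i ∧ i < j ∧ j < (a.length : Int) ∧ d = pvAt a j - pvAt a i := by
  rw [pvDiffs] at hd
  obtain ⟨i, hi, hd2⟩ := List.mem_flatMap.mp hd
  obtain ⟨j, hj, rfl⟩ := List.mem_map.mp hd2
  obtain ⟨hi1, hi2⟩ := PySem.List.mem_pyRange_one.mp hi
  obtain ⟨hj1, hj2⟩ := PySem.List.mem_pyRange_one.mp hj
  exact ⟨i, j, hi1, by omega, hj2, rfl⟩

lemma pvSumRange (N : Nat) (f : Nat → Nat) :
    ((List.range N).map f).sum = ∑ i ∈ Finset.range N, f i := rfl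

lemma pvDiffs_length (a : List Int) : (pvDiffs a).length * 2 = a.length * (a.length - 1) := by
  rw [pvDiffs, List.length_flatMap]
  simp only [List.length_map, PySem.List.length_pyRange_one]
  rw [PySem.List.pyRange_one, List.map_map]
  have hN : ((a.length : Int) - 0).toNat = a.length := by omega
  rw [hN]
  have hfun : ∀ k ∈ List.range a.length,
      ((fun i => ((a.length : Int) - (i + 1)).toNat) ∘ fun k : Nat => (0 : Int) + ↑k) k
        = a.length - 1 - k := by
    intro k hk
    have hk2 : k < a.length := List.mem_range.mp hk
    simp only [Function.comp]
    omega
  rw [List.map_congr_left hfun, pvSumRange, Finset.sum_range_reflect (fun i => i) a.length,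
      Finset.sum_range_id_mul_two]

-- ===== VERDICT (by name: the statement is the Claim_ definition above) =====
theorem find_median_difference_spec : Claim_equal_find_median_difference := by
  intro arr _ hpre
  unfold Spec_find_median_difference Pre_find_median_difference at *
  have hs : (PySem.List.sorted arr (fun x => x) false).Pairwise (· ≤ ·) :=
    PySem.List.sorted_pairwise arr (fun x => x)
  set a := PySem.List.sorted arr (fun x => x) false with ha
  have hne : a ≠ [] := by
    rw [ha]
    simpa [PySem.List.sorted_eq_nil_iff] using hpre
  have hN1 : 1 ≤ a.length := List.length_pos_iff.mpr hne
  set Ds := PySem.List.sorted (pvDiffs a) (fun x => x) false with hDsdef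
  have hperm : Ds.Perm (pvDiffs a) := PySem.List.sorted_perm (pvDiffs a) (fun x => x) false
  have hDs_sorted : Ds.Pairwise (· ≤ ·) := PySem.List.sorted_pairwise (pvDiffs a) (fun x => x)
  have hmlen : Ds.length * 2 = a.length * (a.length - 1) := by
    rw [hperm.length_eq]; exact pvDiffs_length a
  set m := Ds.length with hmdef
  set k := m / 2 with hkdef
  have htgtA : PySem.Int.floordiv (PySem.Int.floordiv ((a.length : Int) * ((a.length : Int) - 1)) 2) 2
      = (k : Int) := by
    have h1 : (a.length : Int) * ((a.length : Int) - 1) = ((m * 2 : Nat) : Int) := by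
      push_cast
      have : (1 : Int) ≤ (a.length : Int) := by exact_mod_cast hN1
      have h2 : ((a.length - 1 : Nat) : Int) = (a.length : Int) - 1 := by omega
      have h3 : ((a.length * (a.length - 1) : Nat) : Int)
          = (a.length : Int) * ((a.length : Int) - 1) := by push_cast [Nat.cast_sub hN1]; ring
      omega
    rw [h1]
    have h4 : (m * 2) / 2 = m := by omega
    rw [show ((2:Int)) = ((2:Nat):Int) from rfl, PySem.Int.floordiv_natCast, h4,
        PySem.Int.floordiv_natCast]
  have hcount : ∀ v : Int, 0 ≤ v →
      count_pairs_with_diff_leq a v = (Ds.countP (fun d => decide (d ≤ v)) : Int) := by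
    intro v hv
    rw [count_correct hs v hv, List.Perm.countP_eq _ hperm]
  have hA : find_median_difference arr
      = pvLoop a (a.length : Int) 0 (PySem.List.pyGetD a (-1) 0 - PySem.List.pyGetD a 0 0) := rfl
  have halt : find_median_difference_alt arr
      = (if PySem.Int.floordiv (Ds.length : Int) 2 > 0 then
          PySem.List.pyGetD Ds (PySem.Int.floordiv (Ds.length : Int) 2 - 1) 0 else 0) := rfl
  have htgtB : PySem.Int.floordiv (Ds.length : Int) 2 = (k : Int) := by
    rw [show ((2:Int)) = ((2:Nat):Int) from rfl, ← hmdef, PySem.Int.floordiv_natCast]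
  have hhigh1 : PySem.List.pyGetD a (-1) 0 = pvAt a ((a.length : Int) - 1) := by
    rw [PySem.List.pyGetD_neg_one a 0 hne, List.getLast_eq_getElem, pvAt,
        PySem.List.pyGetD_eq_getElem a 0 (by omega) (by omega)]
    congr 1
    omega
  have hhigh2 : PySem.List.pyGetD a 0 0 = pvAt a 0 := rfl
  have hhigh0 : 0 ≤ pvAt a ((a.length : Int) - 1) - pvAt a 0 := by
    have := pvAt_mono hs (s := 0) (t := (a.length : Int) - 1) (by omega) (by omega) (by omega)
    omega
  rw [hA, halt, htgtB, hhigh1, hhigh2]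
  by_cases hk0 : k = 0
  · rw [if_neg (by omega)]
    apply pvLoop_eq a (a.length : Int) ((k : Int)) 0 htgtA _ 0 _ (le_refl 0) (le_refl 0) (by omega)
    intro v hv
    rw [hcount v hv, hk0]
    constructor
    · intro hcc
      exfalso
      omega
    · intro hvc
      omega
  · have hk1 : 1 ≤ k := by omega
    have hm1 : k ≤ m := Nat.div_le_self m 2
    have hmpos : 1 ≤ m := by omega
    rw [if_pos (by exact_mod_cast hk1)]
    have hidx : (k : Int) - 1 = ((k - 1 : Nat) : Int) := by omega
    have hget : PySem.List.pyGetD Ds ((k : Int) - 1) 0 = Ds[k - 1]'(by omega) := by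
      rw [hidx, PySem.List.pyGetD_natCast, List.getD_eq_getElem Ds 0 (by omega)]
    rw [hget]
    set ans := Ds[k - 1]'(by omega) with hansdef
    have hmem : ans ∈ pvDiffs a := hperm.mem_iff.mp (List.getElem_mem _)
    obtain ⟨i, j, hi0, hij, hjN, hd⟩ := mem_pvDiffs hmem
    have hans0 : 0 ≤ ans := by
      have := pvAt_mono hs hi0 (le_of_lt hij) hjN
      omega
    have hansHi : ans ≤ pvAt a ((a.length : Int) - 1) - pvAt a 0 := by
      have h1 := pvAt_mono hs (s := j) (t := (a.length : Int) - 1) (by omega) (by omega) (by omega)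
      have h2 := pvAt_mono hs (s := 0) (t := i) (by omega) hi0 (by omega)
      omega
    apply pvLoop_eq a (a.length : Int) ((k : Int)) ans htgtA _ 0 _ (le_refl 0) hans0 (by omega)
    intro v hv
    rw [hcount v hv]
    have hsel := pvSel Ds hDs_sorted k hk1 (by omega) v
    rw [← hansdef] at hsel
    constructor
    · intro hcc
      by_contra hvc
      push Not at hvc
      have := hsel.mpr hvc
      omega
    · intro hvc
      by_contra hcc
      push Not at hcc
      have h5 : k ≤ Ds.countP fun d => decide (d ≤ v) := by exact_mod_cast hcc
      have := hsel.mp h5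
      omega
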